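-- pv_equiv track=rewrite | github.com/tamirsagi891/Virtual-Shareholder-Meeting-Python-2020 | extract_data.py | get_ticker
-- ===== SOURCE A (Python) =====
-- def fix_ticker(ticker):
--     fixed_ticker = ticker[::-1]
--     if len(fixed_ticker) > 9:
--         return 'NONE'
--     if len(fixed_ticker) < 4:
--         fixed_ticker = fixed_ticker + '_' * (4 - len(fixed_ticker))
--     return fixed_ticker
--
-- def get_ticker(link):
--     ticker = ''
--     for let in (link[::-1]):
--         if let == '=':
--             return fix_ticker(ticker)
--         elif let.isalpha():
--             ticker += let.capitalize()
--     return 'NONE'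
-- ===== SOURCE B (Python) =====
-- def get_ticker(link):
--     idx = link.rfind('=')
--     if idx == -1:
--         return 'NONE'
--     ticker = ''.join(c.capitalize() for c in link[idx + 1:] if c.isalpha())
--     if len(ticker) > 9:
--         return 'NONE'
--     if len(ticker) < 4:
--         return ticker + '_' * (4 - len(ticker))
--     return ticker
-- ===== Notes on version B (the rewrite author's own statement) =====
-- stated objective: faster
-- what changed: Replaces the reverse character scan with accumulator-and-final-reverse by locating the last separator with str.rfind and making one forward filter/capitalize pass over the tail, with the length rules applied inline.
import Mathlib
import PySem

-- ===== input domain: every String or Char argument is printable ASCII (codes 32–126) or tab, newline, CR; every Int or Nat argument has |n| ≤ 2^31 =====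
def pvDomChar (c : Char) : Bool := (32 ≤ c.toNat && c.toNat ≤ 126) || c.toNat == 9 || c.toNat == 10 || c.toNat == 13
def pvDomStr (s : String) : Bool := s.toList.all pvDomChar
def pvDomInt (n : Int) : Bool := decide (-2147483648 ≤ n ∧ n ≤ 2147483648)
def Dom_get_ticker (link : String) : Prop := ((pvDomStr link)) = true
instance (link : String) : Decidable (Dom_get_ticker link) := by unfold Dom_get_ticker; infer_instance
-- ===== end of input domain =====

-- B replaces A's reverse scan with accumulator-and-final-reverse by rfind('=') plus one
-- forward filter/capitalize pass (C-level rfind instead of a per-char Python loop; the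
-- timing run measured B faster); same return value on every input.

-- ===== PORT A =====
-- ticker[::-1] (slice with step -1) is reversal; str.capitalize() on a ONE-character
-- string equals uppercasing, exact on the printable-ASCII domain (PySem.Chars.upperChar).
def fix_ticker (ticker : List Char) : String :=
  let fixed_ticker := ticker.reverse
  if fixed_ticker.length > 9 then "NONE"
  else
    let fixed_ticker :=
      if fixed_ticker.length < 4 then fixed_ticker ++ List.replicate (4 - fixed_ticker.length) '_'
      else fixed_ticker
    String.ofList fixed_ticker

-- the for-loop over link[::-1], with the early return on '='
def get_ticker_loop : List Char → List Char → String
  | [], _ => "NONE"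
  | c :: rest, ticker =>
    if c = '=' then fix_ticker ticker
    else if PySem.Chars.isalpha c then get_ticker_loop rest (ticker ++ [PySem.Chars.upperChar c])
    else get_ticker_loop rest ticker

def get_ticker (link : String) : String :=
  get_ticker_loop link.toList.reverse []

-- ===== PORT B =====
-- ''.join(...) builds the string once: String.ofList of the filtered, capitalized tail
def get_ticker_alt (link : String) : String :=
  let idx := PySem.Str.rfind link "="
  if idx = -1 then "NONE"
  else
    let ticker := ((PySem.List.slice link.toList (some (idx + 1)) none).filter
      PySem.Chars.isalpha).map PySem.Chars.upperChar
    if ticker.length > 9 then "NONE"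
    else if ticker.length < 4 then String.ofList (ticker ++ List.replicate (4 - ticker.length) '_')
    else String.ofList ticker

-- ===== PRECONDITION & SPEC =====
def Spec_get_ticker (link : String) (out : String) : Prop := out = get_ticker_alt link
instance (link : String) (out : String) : Decidable (Spec_get_ticker link out) := by unfold Spec_get_ticker; infer_instance

-- ===== CLAIM (what is proved, stated in full; the proofs are below) =====
def Claim_equal_get_ticker : Prop := ∀ (link : String), Dom_get_ticker link → Spec_get_ticker link (get_ticker link)

-- ===== LEMMAS AND PROOFS =====

lemma go_zero (s sub : List Char) :
    PySem.Chars.rfind.go s sub 0 = if sub.isPrefixOf s then 0 else -1 := rfl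

lemma go_succ (s sub : List Char) (j : Nat) :
    PySem.Chars.rfind.go s sub (j + 1) =
      if sub.isPrefixOf (s.drop (j + 1)) then ((j : Int) + 1) else PySem.Chars.rfind.go s sub j := by
  rfl

lemma isPrefixOf_eq_single (l : List Char) :
    (['='].isPrefixOf l) = (match l with | [] => false | a :: _ => a == '=') := by
  cases l <;> simp [List.isPrefixOf, eq_comm]

lemma isPrefixOf_eq_append (xs : List Char) (c : Char) (hc : c ≠ '=') :
    (['='].isPrefixOf (xs ++ [c])) = (['='].isPrefixOf xs) := by
  cases xs with
  | nil => simp [isPrefixOf_eq_single, hc]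
  | cons a t => simp [isPrefixOf_eq_single]

lemma go_append_ne (s : List Char) (c : Char) (hc : c ≠ '=') :
    ∀ j : Nat, j ≤ s.length →
      PySem.Chars.rfind.go (s ++ [c]) ['='] j = PySem.Chars.rfind.go s ['='] j := by
  intro j
  induction j with
  | zero =>
    intro _
    rw [go_zero, go_zero, isPrefixOf_eq_append s c hc]
  | succ j ih =>
    intro hj
    rw [go_succ, go_succ, List.drop_append_of_le_length (by omega),
      isPrefixOf_eq_append _ c hc, ih (by omega)]

lemma rfind_append_ne (s : List Char) (c : Char) (hc : c ≠ '=') :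
    PySem.Chars.rfind (s ++ [c]) ['='] = PySem.Chars.rfind s ['='] := by
  have h1 : (s ++ [c]).drop (s.length + 1) = [] := List.drop_eq_nil_of_le (by simp)
  show PySem.Chars.rfind.go (s ++ [c]) ['='] (s ++ [c]).length = _
  rw [List.length_append, List.length_singleton, go_succ, h1,
    if_neg (by simp [List.isPrefixOf])]
  exact go_append_ne s c hc s.length le_rfl

lemma rfind_append_eq (s : List Char) :
    PySem.Chars.rfind (s ++ ['=']) ['='] = (s.length : Int) := by
  show PySem.Chars.rfind.go (s ++ ['=']) ['='] (s ++ ['=']).length = _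
  rw [List.length_append, List.length_singleton]
  cases s with
  | nil => decide
  | cons a t =>
    have h1 : ((a :: t) ++ ['=']).drop (t.length + 1 + 1) = [] :=
      List.drop_eq_nil_of_le (by simp)
    have h2 : ((a :: t) ++ ['=']).drop (t.length + 1) = ['='] := by
      rw [List.drop_append_of_le_length (by simp)]
      simp
    rw [show (a :: t).length + 1 = t.length + 1 + 1 by simp, go_succ, h1,
      if_neg (by simp [List.isPrefixOf]), go_succ, h2,
      if_pos (by simp [List.isPrefixOf])]
    simp

lemma go_cases (s : List Char) :
    ∀ j : Nat, PySem.Chars.rfind.go s ['='] j = -1 ∨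
      ∃ i : Nat, PySem.Chars.rfind.go s ['='] j = (i : Int) ∧ i < s.length := by
  intro j
  induction j with
  | zero =>
    rw [go_zero]
    by_cases h : ['='].isPrefixOf s
    · right
      refine ⟨0, by simp [h], ?_⟩
      cases s with
      | nil => simp [List.isPrefixOf] at h
      | cons a t => simp
    · left; simp [h]
  | succ j ih =>
    rw [go_succ]
    by_cases h : ['='].isPrefixOf (s.drop (j + 1))
    · right
      refine ⟨j + 1, by simp [h], ?_⟩
      by_contra hlen
      rw [List.drop_eq_nil_of_le (by omega)] at h
      simp [List.isPrefixOf] at h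
    · simpa [h] using ih

lemma rfind_cases (s : List Char) :
    PySem.Chars.rfind s ['='] = -1 ∨
      ∃ i : Nat, PySem.Chars.rfind s ['='] = (i : Int) ∧ i < s.length :=
  go_cases s s.length

lemma key (s : List Char) : ∀ acc : List Char,
    get_ticker_loop s.reverse acc =
      if PySem.Chars.rfind s ['='] = -1 then "NONE"
      else fix_ticker (acc ++
        (((s.drop ((PySem.Chars.rfind s ['=']).toNat + 1)).filter
            PySem.Chars.isalpha).map PySem.Chars.upperChar).reverse) := by
  induction s using List.reverseRecOn with
  | nil =>
    intro acc
    have h : PySem.Chars.rfind ([] : List Char) ['='] = -1 := rfl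
    simp [get_ticker_loop, h]
  | append_singleton s c ih =>
    intro acc
    rw [List.reverse_append, List.reverse_singleton, List.singleton_append]
    by_cases hc : c = '='
    · subst hc
      rw [rfind_append_eq]
      have hne : (s.length : Int) ≠ -1 := by omega
      rw [if_neg hne]
      have htn : ((s.length : Int)).toNat = s.length := by omega
      rw [htn, List.drop_eq_nil_of_le (by simp)]
      simp [get_ticker_loop]
    · rw [rfind_append_ne s c hc]
      rcases rfind_cases s with hneg | ⟨i, hi, hilen⟩
      · rw [hneg]
        show get_ticker_loop (c :: s.reverse) acc = "NONE"
        unfold get_ticker_loop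
        rw [if_neg hc]
        by_cases ha : PySem.Chars.isalpha c
        · rw [if_pos ha, ih]; rw [hneg]; simp
        · rw [if_neg ha, ih]; rw [hneg]; simp
      · rw [hi]
        have hne : (i : Int) ≠ -1 := by omega
        rw [if_neg hne]
        have htn : ((i : Int)).toNat = i := by omega
        rw [htn]
        have hdrop : (s ++ [c]).drop (i + 1) = s.drop (i + 1) ++ [c] :=
          List.drop_append_of_le_length (by omega)
        rw [hdrop]
        show get_ticker_loop (c :: s.reverse) acc = _
        unfold get_ticker_loop
        rw [if_neg hc]
        by_cases ha : PySem.Chars.isalpha c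
        · rw [if_pos ha, ih]
          rw [hi, if_neg hne, htn]
          simp [List.filter_append, ha, List.append_assoc]
        · rw [if_neg ha, ih]
          rw [hi, if_neg hne, htn]
          simp [List.filter_append, ha]

-- ===== VERDICT (by name: the statement is the Claim_ definition above) =====
theorem get_ticker_spec : Claim_equal_get_ticker := by
  intro link _
  show get_ticker link = get_ticker_alt link
  unfold get_ticker get_ticker_alt
  rw [key]
  have hb : PySem.Str.rfind link "=" = PySem.Chars.rfind link.toList ['='] := by
    simp [PySem.Str.rfind_eq]
  rw [hb]
  rcases rfind_cases link.toList with hneg | ⟨i, hi, hilen⟩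
  · rw [hneg]; simp
  · rw [hi]
    have hne : (i : Int) ≠ -1 := by omega
    rw [if_neg hne]
    simp only [if_neg hne]
    have hslice : PySem.List.slice link.toList (some ((i : Int) + 1)) none =
        link.toList.drop (i + 1) := by
      rw [PySem.List.slice_from _ (by omega)]
      norm_num
    rw [hslice]
    have htn : ((i : Int)).toNat = i := by omega
    rw [htn]
    unfold fix_ticker
    simp only [List.nil_append, List.reverse_reverse]
    split_ifs <;> rfl
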